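-- pv_equiv track=rewrite | github.com/Shankaranaarayanan/VisionSync | Website/module/depth.py | formatter_depth
-- ===== SOURCE A (Python) =====
-- def formatter_depth(formatted):
--   form = []
--   for ind,i in enumerate(formatted):
--     temp=[]
--     for indj,j in enumerate(i):
--       if(j>200):
--         temp.append(255)
--       elif(j>150):
--         temp.append(150)
--       elif(j>100):
--         temp.append(100)
--       elif(j>50):
--         temp.append(50)
--       else:
--         temp.append(0)
--     form.append(temp)
--   return form
-- ===== SOURCE B (Python) =====
-- from bisect import bisect_left
--
-- _THRESHOLDS = [50, 100, 150, 200]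
-- _LEVELS = [0, 50, 100, 150, 255]
--
-- def formatter_depth(formatted):
--     return [[_LEVELS[bisect_left(_THRESHOLDS, j)] for j in row] for row in formatted]
-- ===== Notes on version B (the rewrite author's own statement) =====
-- stated objective: idiomatic
-- what changed: Replaces the nested append loops with a five-line comprehension that looks each value up in a precomputed threshold table via bisect_left instead of a four-way if/elif chain.
import Mathlib
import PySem

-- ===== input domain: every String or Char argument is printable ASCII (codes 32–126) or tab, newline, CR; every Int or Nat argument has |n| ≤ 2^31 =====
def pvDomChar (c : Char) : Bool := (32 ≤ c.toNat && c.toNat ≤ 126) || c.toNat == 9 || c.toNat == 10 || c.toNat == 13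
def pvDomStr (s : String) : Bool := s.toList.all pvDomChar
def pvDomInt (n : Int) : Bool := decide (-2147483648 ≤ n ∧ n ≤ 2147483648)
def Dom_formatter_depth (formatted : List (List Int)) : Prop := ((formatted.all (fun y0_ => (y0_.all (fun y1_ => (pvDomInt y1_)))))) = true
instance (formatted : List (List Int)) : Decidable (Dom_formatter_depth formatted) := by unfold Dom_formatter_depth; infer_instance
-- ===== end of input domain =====

-- B replaces A's nested if/elif append loops with comprehensions that index a precomputed
-- level table via bisect_left (objective: idiomatic; same complexity).

-- ===== PORT A =====
-- A: nested for-loops over enumerate, appending to accumulators via an if/elif chain.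
def formatter_depth (formatted : List (List Int)) : List (List Int) :=
  (PySem.List.enumerate formatted).foldl (fun form p =>
    let i := p.2
    let temp := (PySem.List.enumerate i).foldl (fun temp q =>
      let j := q.2
      if j > 200 then temp ++ [255]
      else if j > 150 then temp ++ [150]
      else if j > 100 then temp ++ [100]
      else if j > 50 then temp ++ [50]
      else temp ++ [0]) []
    form ++ [temp]) []

-- ===== PORT B =====
-- B: table lookup via bisect_left; bisect_left on the sorted 4-element threshold
-- table is ported exactly by its contract: the number of thresholds strictly below j.
def pvThresholds : List Int := [50, 100, 150, 200]
def pvLevels : List Int := [0, 50, 100, 150, 255]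
def pvBisectLeft (j : Int) : Nat := pvThresholds.countP (fun t => t < j)
def formatter_depth_alt (formatted : List (List Int)) : List (List Int) :=
  formatted.map (fun row => row.map (fun j => pvLevels.getD (pvBisectLeft j) 0))

-- ===== PRECONDITION & SPEC =====
def Spec_formatter_depth (formatted : List (List Int)) (out : List (List Int)) : Prop := out = formatter_depth_alt formatted
instance (formatted : List (List Int)) (out : List (List Int)) : Decidable (Spec_formatter_depth formatted out) := by unfold Spec_formatter_depth; infer_instance

-- ===== CLAIM (what is proved, stated in full; the proofs are below) =====
def Claim_equal_formatter_depth : Prop := ∀ (formatted : List (List Int)), Dom_formatter_depth formatted → Spec_formatter_depth formatted (formatter_depth formatted)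

-- ===== LEMMAS AND PROOFS =====

-- ===== VERDICT (by name: the statement is the Claim_ definition above) =====
-- one element: the if/elif chain equals the table lookup
theorem pv_elem (j : Int) :
    (if j > 200 then (255:Int) else if j > 150 then 150 else if j > 100 then 100
     else if j > 50 then 50 else 0) = pvLevels.getD (pvBisectLeft j) 0 := by
  simp only [pvBisectLeft, pvThresholds, pvLevels, List.countP_cons, List.countP_nil]
  split_ifs with h1 h2 h3 h4 <;> simp_all [decide_eq_true_eq] <;> omega

-- inner loop: append-fold equals map
theorem pv_inner (i : List Int) (s : Int) (acc : List Int) :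
    (PySem.List.enumerate i s).foldl (fun temp q =>
      let j := q.2
      if j > 200 then temp ++ [255]
      else if j > 150 then temp ++ [150]
      else if j > 100 then temp ++ [100]
      else if j > 50 then temp ++ [50]
      else temp ++ [0]) acc
    = acc ++ i.map (fun j => pvLevels.getD (pvBisectLeft j) 0) := by
  induction i generalizing s acc with
  | nil => simp [PySem.List.enumerate]
  | cons x xs ih =>
    rw [PySem.List.enumerate_cons]
    simp only [List.foldl_cons, List.map_cons]
    rw [ih]
    rw [← pv_elem x]
    split_ifs <;> simp

theorem formatter_depth_spec : Claim_equal_formatter_depth := by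
  intro formatted hd
  clear hd
  unfold Spec_formatter_depth formatter_depth formatter_depth_alt
  suffices h : ∀ (s : Int) (acc : List (List Int)),
      (PySem.List.enumerate formatted s).foldl (fun form p =>
        let i := p.2
        let temp := (PySem.List.enumerate i).foldl (fun temp q =>
          let j := q.2
          if j > 200 then temp ++ [255]
          else if j > 150 then temp ++ [150]
          else if j > 100 then temp ++ [100]
          else if j > 50 then temp ++ [50]
          else temp ++ [0]) []
        form ++ [temp]) acc
      = acc ++ formatted.map (fun row => row.map (fun j => pvLevels.getD (pvBisectLeft j) 0)) by
    simpa using h 0 []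
  induction formatted with
  | nil => intro s acc; simp [PySem.List.enumerate]
  | cons r rs ih =>
    intro s acc
    rw [PySem.List.enumerate_cons]
    simp only [List.foldl_cons, List.map_cons]
    rw [ih, pv_inner]
    simp
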